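-- pv_equiv track=rewrite | github.com/dudcheol/AlgoStack | JANG_SO_HYEON/Programmers/BaseStation.py | solution
-- ===== SOURCE A (Python) =====
-- import math
-- import math
--
-- def solution(n, stations, w):
--     answer = 0
--     spread = [False]*n
--
--     # 전파 도달하는 곳 : True
--     for i in stations:
--         if i-w-1 >= 0 and i+w < n:
--             for j in range(i-w-1, i+w):
--                 spread[j] = True
--         elif i-w-1 >= 0:
--             for j in range(i-w-1, n):
--                 spread[j] = True
--         elif i+w < n:
--             for j in range(0, i+w):
--                 spread[j] = True
--         else:
--             for j in range(0, n):
--                 spread[j] = True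
--     count = 0
--
--     for i in range(n):
--         if spread[i] == False:
--             count += 1
--         else:
--             answer += math.ceil(count/(w*2+1))
--             count = 0
--
--     if count > 0:
--         answer += math.ceil(count/(w*2+1))
--
--     return answer
-- ===== SOURCE B (Python) =====
-- def solution(n, stations, w):
--     # Sweep sorted coverage intervals and sum ceil(gap / (2w+1)) per uncovered gap,
--     # instead of painting a boolean array of size n.
--     d = 2 * w + 1
--     ivs = sorted((lo, hi) for lo, hi in
--                  ((max(0, i - w - 1), min(n, i + w)) for i in stations)
--                  if lo < hi)
--     ans = 0
--     pos = 0
--     for lo, hi in ivs: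
--         if lo > pos:
--             ans += -((pos - lo) // d)
--             pos = hi
--         elif hi > pos:
--             pos = hi
--     if n > pos:
--         ans += -((pos - n) // d)
--     return ans
-- ===== Notes on version B (the rewrite author's own statement) =====
-- stated objective: faster
-- what changed: Instead of painting a boolean array of size n per station and scanning it for runs of uncovered cells, B sorts the stations' clipped coverage intervals and sweeps them once, adding ceil(gap/(2w+1)) per uncovered gap with exact integer ceiling division.
import Mathlib
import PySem

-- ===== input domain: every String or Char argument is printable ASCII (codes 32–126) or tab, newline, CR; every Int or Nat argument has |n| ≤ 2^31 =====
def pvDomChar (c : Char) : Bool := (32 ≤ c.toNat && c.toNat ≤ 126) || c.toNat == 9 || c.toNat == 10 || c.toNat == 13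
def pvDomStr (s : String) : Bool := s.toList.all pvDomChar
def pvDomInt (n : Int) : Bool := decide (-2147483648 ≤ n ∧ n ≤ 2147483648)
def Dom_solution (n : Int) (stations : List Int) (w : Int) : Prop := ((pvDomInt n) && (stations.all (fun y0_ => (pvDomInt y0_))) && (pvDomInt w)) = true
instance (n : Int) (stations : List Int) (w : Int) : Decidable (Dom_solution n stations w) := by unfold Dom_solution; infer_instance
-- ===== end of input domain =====

-- B replaces A's O(n)-sized boolean coverage array with a sort-and-sweep over coverage
-- intervals, summing one ceiling division per uncovered gap (objective: faster).


-- ===== PORT A =====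
-- math.ceil(a / b) for ints: exact integer form (on the stated domain |a| ≤ 2^31 < 2^53
-- the float division Python performs rounds to a value with the same ceiling).
def pyCeil (a b : Int) : Int := -(PySem.Int.floordiv (-a) b)

-- A's inner marking loop 'for j in range(a, b): spread[j] = True' (it appears four times in A).
def markA (sp : List Bool) (a b : Int) : List Bool :=
  (PySem.List.pyRange a b 1).foldl (fun sp j => PySem.List.pySetD sp j true) sp

def solution (n : Int) (stations : List Int) (w : Int) : Int :=
  let spread := stations.foldl (fun sp i =>
    if 0 ≤ i - w - 1 ∧ i + w < n then markA sp (i - w - 1) (i + w)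
    else if 0 ≤ i - w - 1 then markA sp (i - w - 1) n
    else if i + w < n then markA sp 0 (i + w)
    else markA sp 0 n) (List.replicate n.toNat false)
  let ac := (PySem.List.pyRange 0 n 1).foldl (fun (ac : Int × Int) i =>
      if PySem.List.pyGetD spread i false == false then (ac.1, ac.2 + 1)
      else (ac.1 + pyCeil ac.2 (w * 2 + 1), 0)) ((0 : Int), (0 : Int))
  if ac.2 > 0 then ac.1 + pyCeil ac.2 (w * 2 + 1) else ac.1

-- ===== PORT B =====
def solution_alt (n : Int) (stations : List Int) (w : Int) : Int :=
  let d := 2 * w + 1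
  let ivs := PySem.List.sorted2
    ((stations.map (fun i => (max 0 (i - w - 1), min n (i + w)))).filter
      (fun p => decide (p.1 < p.2)))
    (fun p => p.1) (fun p => p.2)
  let st := ivs.foldl (fun (s : Int × Int) p =>
      if p.1 > s.2 then (s.1 + -(PySem.Int.floordiv (s.2 - p.1) d), p.2)
      else if p.2 > s.2 then (s.1, p.2) else s) ((0 : Int), (0 : Int))
  if n > st.2 then st.1 + -(PySem.Int.floordiv (st.2 - n) d) else st.1

-- ===== PRECONDITION & SPEC =====
def Spec_solution (n : Int) (stations : List Int) (w : Int) (out : Int) : Prop := out = solution_alt n stations w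
instance (n : Int) (stations : List Int) (w : Int) (out : Int) : Decidable (Spec_solution n stations w out) := by unfold Spec_solution; infer_instance

-- ===== CLAIM (what is proved, stated in full; the proofs are below) =====
def Claim_equal_solution : Prop := ∀ (n : Int) (stations : List Int) (w : Int), Dom_solution n stations w → Spec_solution n stations w (solution n stations w)

-- ===== LEMMAS AND PROOFS =====

-- A's scan loop, as a recursion over the boolean coverage list.
def scanRec (dd : Int) : List Bool → Int → Int → Int
  | [], ans, c => if c > 0 then ans + pyCeil c dd else ans
  | b :: t, ans, c => if b == false then scanRec dd t ans (c + 1) else scanRec dd t (ans + pyCeil c dd) 0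

-- B's sweep loop, as a recursion over the interval list.
def sweepRec (nn dd : Int) : List (Int × Int) → Int → Int → Int
  | [], ans, pos => if nn > pos then ans + -(PySem.Int.floordiv (pos - nn) dd) else ans
  | p :: t, ans, pos =>
      if p.1 > pos then sweepRec nn dd t (ans + -(PySem.Int.floordiv (pos - p.1) dd)) p.2
      else if p.2 > pos then sweepRec nn dd t ans p.2
      else sweepRec nn dd t ans pos

-- "position j is covered by one of the intervals"
def covL (ivs : List (Int × Int)) (j : Int) : Bool := ivs.any (fun p => decide (p.1 ≤ j ∧ j < p.2))

-- ----- A side -----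

theorem markA_length (sp : List Bool) (a b : Int) : (markA sp a b).length = sp.length := by
  unfold markA
  induction PySem.List.pyRange a b 1 generalizing sp with
  | nil => rfl
  | cons x t ih => simp [List.foldl_cons, ih, PySem.List.length_pySetD]

theorem markA_getD (sp : List Bool) (a b : Int) (ha : 0 ≤ a) (hb : b ≤ (sp.length : Int))
    (k : Nat) :
    (markA sp a b).getD k false = (sp.getD k false || decide (a ≤ (k : Int) ∧ (k : Int) < b)) := by
  by_cases hab : b ≤ a
  · unfold markA
    rw [PySem.List.pyRange_one_eq_nil hab]
    simp only [List.foldl_nil]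
    have : ¬ (a ≤ (k : Int) ∧ (k : Int) < b) := by omega
    simp [this]
  · replace hab : a < b := by omega
    have hrec : markA sp a b = markA (PySem.List.pySetD sp a true) (a + 1) b := by
      unfold markA
      rw [PySem.List.pyRange_one_cons hab]
      rfl
    have hlt : a.toNat < sp.length := by omega
    have hset : PySem.List.pySetD sp a true = sp.set a.toNat true :=
      PySem.List.pySetD_of_nonneg sp true ha
    have hlen2 : b ≤ (((sp.set a.toNat true).length : Nat) : Int) := by
      simpa using hb
    have ih := markA_getD (sp.set a.toNat true) (a + 1) b (by omega) hlen2 k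
    rw [hrec, hset, ih]
    by_cases hk : k = a.toNat
    · have h1 : (sp.set a.toNat true).getD k false = true := by
        rw [hk]
        simp [List.getD_eq_getElem?_getD, hlt]
      rw [h1, decide_eq_true (show a ≤ (k : Int) ∧ (k : Int) < b by omega)]
      simp
    · have h0 : (sp.set a.toNat true).getD k false = sp.getD k false := by
        simp [List.getD_eq_getElem?_getD, Ne.symm hk]
      rw [h0]
      congr 1
      have hka : (k : Int) ≠ a := by omega
      by_cases h1 : a + 1 ≤ (k : Int) ∧ (k : Int) < b
      · rw [decide_eq_true h1, decide_eq_true (show a ≤ (k : Int) ∧ (k : Int) < b by omega)]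
      · rw [decide_eq_false h1, decide_eq_false (show ¬ (a ≤ (k : Int) ∧ (k : Int) < b) by omega)]
  termination_by (b - a).toNat
  decreasing_by omega

theorem branch_eq_markA (n w : Int) (sp : List Bool) (i : Int) :
    (if 0 ≤ i - w - 1 ∧ i + w < n then markA sp (i - w - 1) (i + w)
     else if 0 ≤ i - w - 1 then markA sp (i - w - 1) n
     else if i + w < n then markA sp 0 (i + w)
     else markA sp 0 n) = markA sp (max 0 (i - w - 1)) (min n (i + w)) := by
  split_ifs with h1 h2 h3
  · rw [show max 0 (i - w - 1) = i - w - 1 by omega, show min n (i + w) = i + w by omega]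
  · rw [show max 0 (i - w - 1) = i - w - 1 by omega, show min n (i + w) = n by omega]
  · rw [show max 0 (i - w - 1) = 0 by omega, show min n (i + w) = i + w by omega]
  · rw [show max 0 (i - w - 1) = 0 by omega, show min n (i + w) = n by omega]

theorem foldl_markA_getD (n w : Int) (sts : List Int) (sp : List Bool)
    (hlen : (n : Int) ≤ (sp.length : Int)) (k : Nat) :
    (sts.foldl (fun sp i => markA sp (max 0 (i - w - 1)) (min n (i + w))) sp).getD k false
      = (sp.getD k false || sts.any (fun i => decide (max 0 (i - w - 1) ≤ (k : Int) ∧ (k : Int) < min n (i + w)))) := by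
  induction sts generalizing sp with
  | nil => simp
  | cons x t ih =>
    rw [List.foldl_cons]
    have hlen2 : (n : Int) ≤ (((markA sp (max 0 (x - w - 1)) (min n (x + w))).length : Nat) : Int) := by
      rw [markA_length]; exact hlen
    rw [ih _ hlen2, markA_getD sp _ _ (le_max_left _ _) (by omega) k]
    simp [Bool.or_assoc]

theorem foldl_markA_length (n w : Int) (sts : List Int) (sp : List Bool) :
    (sts.foldl (fun sp i => markA sp (max 0 (i - w - 1)) (min n (i + w))) sp).length = sp.length := by
  induction sts generalizing sp with
  | nil => rfl
  | cons x t ih => simp [List.foldl_cons, ih, markA_length]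

-- A's scan fold, rewritten as scanRec.
theorem scan_foldl_eq (dd : Int) (l : List Bool) (ans c : Int) :
    (if (l.foldl (fun (ac : Int × Int) b =>
          if b == false then (ac.1, ac.2 + 1) else (ac.1 + pyCeil ac.2 dd, 0)) (ans, c)).2 > 0
     then (l.foldl (fun (ac : Int × Int) b =>
          if b == false then (ac.1, ac.2 + 1) else (ac.1 + pyCeil ac.2 dd, 0)) (ans, c)).1
          + pyCeil (l.foldl (fun (ac : Int × Int) b =>
          if b == false then (ac.1, ac.2 + 1) else (ac.1 + pyCeil ac.2 dd, 0)) (ans, c)).2 dd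
     else (l.foldl (fun (ac : Int × Int) b =>
          if b == false then (ac.1, ac.2 + 1) else (ac.1 + pyCeil ac.2 dd, 0)) (ans, c)).1)
      = scanRec dd l ans c := by
  induction l generalizing ans c with
  | nil => rfl
  | cons b t ih =>
    cases b
    · simpa [scanRec] using ih ans (c + 1)
    · simpa [scanRec] using ih (ans + pyCeil c dd) 0

theorem pyRange_toNat (n : Int) : PySem.List.pyRange 0 n 1 = PySem.List.pyRange 0 ((n.toNat : Int)) 1 := by
  by_cases h : 0 ≤ n
  · rw [Int.toNat_of_nonneg h]
  · rw [PySem.List.pyRange_one_eq_nil (by omega), PySem.List.pyRange_one_eq_nil (by omega)]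

-- A equals the scan of the pointwise coverage predicate of the stations.
theorem solution_eq_scan (n : Int) (stations : List Int) (w : Int) :
    solution n stations w
      = scanRec (w * 2 + 1)
          ((PySem.List.pyRange 0 n 1).map (fun j =>
            stations.any (fun i => decide (max 0 (i - w - 1) ≤ j ∧ j < min n (i + w))))) 0 0 := by
  have hbody : (fun (sp : List Bool) (i : Int) =>
      if 0 ≤ i - w - 1 ∧ i + w < n then markA sp (i - w - 1) (i + w)
      else if 0 ≤ i - w - 1 then markA sp (i - w - 1) n
      else if i + w < n then markA sp 0 (i + w)
      else markA sp 0 n)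
      = (fun sp i => markA sp (max 0 (i - w - 1)) (min n (i + w))) :=
    funext fun sp => funext fun i => branch_eq_markA n w sp i
  have hspread : stations.foldl (fun sp i => markA sp (max 0 (i - w - 1)) (min n (i + w)))
        (List.replicate n.toNat false)
      = (PySem.List.pyRange 0 n 1).map (fun j =>
          stations.any (fun i => decide (max 0 (i - w - 1) ≤ j ∧ j < min n (i + w)))) := by
    apply List.ext_getElem
    · rw [foldl_markA_length]
      simp [PySem.List.length_pyRange_one]
    · intro k h1 h2
      have hk : k < n.toNat := by
        rw [foldl_markA_length] at h1; simpa using h1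
      have hlen : (n : Int) ≤ (((List.replicate n.toNat false).length : Nat) : Int) := by
        simp
      have hg := foldl_markA_getD n w stations (List.replicate n.toNat false) hlen k
      rw [List.getD_eq_getElem _ _ h1] at hg
      rw [hg]
      have hrep : (List.replicate n.toNat false).getD k false = false := by
        simp
      rw [hrep]
      simp only [List.getElem_map, PySem.List.getElem_pyRange_one, Bool.false_or, zero_add]
  unfold solution
  simp only [hbody]
  have hlenf : (stations.foldl (fun sp i => markA sp (max 0 (i - w - 1)) (min n (i + w)))
      (List.replicate n.toNat false)).length = n.toNat := by
    rw [foldl_markA_length]; simp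
  rw [show PySem.List.pyRange 0 n 1
      = PySem.List.pyRange 0 ((((stations.foldl (fun sp i => markA sp (max 0 (i - w - 1)) (min n (i + w)))
          (List.replicate n.toNat false)).length : Nat) : Int)) 1 from by
    rw [hlenf]; exact pyRange_toNat n]
  rw [PySem.List.foldl_pyRange_zero_pyGetD' (stations.foldl (fun sp i => markA sp (max 0 (i - w - 1)) (min n (i + w)))
      (List.replicate n.toNat false)) false
      (fun (ac : Int × Int) b => if b == false then (ac.1, ac.2 + 1)
        else (ac.1 + pyCeil ac.2 (w * 2 + 1), 0)) ((0 : Int), (0 : Int))]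
  rw [hspread]
  rw [show ((((PySem.List.pyRange 0 n 1).map (fun j =>
      stations.any (fun i => decide (max 0 (i - w - 1) ≤ j ∧ j < min n (i + w))))).length : Nat) : Int)
      = ((n.toNat : Nat) : Int) from by simp [PySem.List.length_pyRange_one]]
  rw [← pyRange_toNat n]
  exact scan_foldl_eq (w * 2 + 1) ((PySem.List.pyRange 0 n 1).map (fun j =>
    stations.any (fun i => decide (max 0 (i - w - 1) ≤ j ∧ j < min n (i + w))))) 0 0

-- ----- scanRec bookkeeping -----

theorem scanRec_false_prefix (dd : Int) (k : Nat) (l : List Bool) (ans c : Int) :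
    scanRec dd (List.replicate k false ++ l) ans c = scanRec dd l ans (c + (k : Int)) := by
  induction k generalizing c with
  | zero => simp
  | succ m ih =>
    rw [List.replicate_succ, List.cons_append]
    simp only [scanRec, beq_self_eq_true, if_pos]
    rw [ih]
    congr 1
    push_cast
    ring

theorem scanRec_true_prefix (dd : Int) (k : Nat) (l : List Bool) (ans : Int) :
    scanRec dd (List.replicate k true ++ l) ans 0 = scanRec dd l ans 0 := by
  induction k with
  | zero => simp
  | succ m ih =>
    rw [List.replicate_succ, List.cons_append]
    simp only [scanRec]
    simp [pyCeil, PySem.Int.floordiv, ih]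

-- ----- B side -----

theorem insertBy_lex_pairwise (x : Int × Int) (l : List (Int × Int))
    (h : l.Pairwise (fun p q => p.1 ≤ q.1)) :
    (PySem.List.insertBy
      (fun a b => decide (a.1 < b.1) || (!decide (b.1 < a.1) && decide (a.2 < b.2))) x l).Pairwise
      (fun p q => p.1 ≤ q.1) := by
  induction l with
  | nil => simp [PySem.List.insertBy]
  | cons y ys ih =>
    rw [List.pairwise_cons] at h
    obtain ⟨hy, hys⟩ := h
    by_cases hc : (decide (x.1 < y.1) || (!decide (y.1 < x.1) && decide (x.2 < y.2))) = true
    · rw [show PySem.List.insertBy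
          (fun a b => decide (a.1 < b.1) || (!decide (b.1 < a.1) && decide (a.2 < b.2))) x (y :: ys)
          = x :: y :: ys by simp [PySem.List.insertBy, hc]]
      have hx1 : x.1 ≤ y.1 := by
        simp only [Bool.or_eq_true, Bool.and_eq_true, Bool.not_eq_true', decide_eq_true_eq, decide_eq_false_iff_not] at hc
        omega
      refine List.pairwise_cons.mpr ⟨?_, List.pairwise_cons.mpr ⟨hy, hys⟩⟩
      intro z hz
      rcases List.mem_cons.mp hz with rfl | hz
      · exact hx1
      · exact le_trans hx1 (hy z hz)
    · rw [show PySem.List.insertBy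
          (fun a b => decide (a.1 < b.1) || (!decide (b.1 < a.1) && decide (a.2 < b.2))) x (y :: ys)
          = y :: PySem.List.insertBy (fun a b => decide (a.1 < b.1) || (!decide (b.1 < a.1) && decide (a.2 < b.2))) x ys by
        simp [PySem.List.insertBy, hc]]
      refine List.pairwise_cons.mpr ⟨?_, ih hys⟩
      intro z hz
      rw [PySem.List.mem_insertBy] at hz
      have hyx : y.1 ≤ x.1 := by
        simp only [Bool.or_eq_true, Bool.and_eq_true, Bool.not_eq_true', decide_eq_true_eq, decide_eq_false_iff_not] at hc
        omega
      rcases hz with rfl | hz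
      · exact hyx
      · exact hy z hz

theorem sorted2_fst_pairwise (xs : List (Int × Int)) :
    (PySem.List.sorted2 xs (fun p => p.1) (fun p => p.2)).Pairwise (fun p q => p.1 ≤ q.1) := by
  show (List.foldl (fun acc x => PySem.List.insertBy
      (fun a b => decide (a.1 < b.1) || (!decide (b.1 < a.1) && decide (a.2 < b.2))) x acc) [] xs).Pairwise
      (fun p q => p.1 ≤ q.1)
  have main : ∀ (acc : List (Int × Int)), acc.Pairwise (fun p q => p.1 ≤ q.1) →
      (List.foldl (fun acc x => PySem.List.insertBy
        (fun a b => decide (a.1 < b.1) || (!decide (b.1 < a.1) && decide (a.2 < b.2))) x acc) acc xs).Pairwise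
        (fun p q => p.1 ≤ q.1) := by
    induction xs with
    | nil => intro acc h; exact h
    | cons x t ih =>
      intro acc h
      exact ih _ (insertBy_lex_pairwise x acc h)
  exact main [] (List.Pairwise.nil)

-- B's sweep fold, rewritten as sweepRec.
theorem sweep_foldl_eq (nn dd : Int) (ivs : List (Int × Int)) (ans pos : Int) :
    (if nn > (ivs.foldl (fun (s : Int × Int) p =>
        if p.1 > s.2 then (s.1 + -(PySem.Int.floordiv (s.2 - p.1) dd), p.2)
        else if p.2 > s.2 then (s.1, p.2) else s) (ans, pos)).2
     then (ivs.foldl (fun (s : Int × Int) p =>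
        if p.1 > s.2 then (s.1 + -(PySem.Int.floordiv (s.2 - p.1) dd), p.2)
        else if p.2 > s.2 then (s.1, p.2) else s) (ans, pos)).1
        + -(PySem.Int.floordiv ((ivs.foldl (fun (s : Int × Int) p =>
        if p.1 > s.2 then (s.1 + -(PySem.Int.floordiv (s.2 - p.1) dd), p.2)
        else if p.2 > s.2 then (s.1, p.2) else s) (ans, pos)).2 - nn) dd)
     else (ivs.foldl (fun (s : Int × Int) p =>
        if p.1 > s.2 then (s.1 + -(PySem.Int.floordiv (s.2 - p.1) dd), p.2)
        else if p.2 > s.2 then (s.1, p.2) else s) (ans, pos)).1)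
      = sweepRec nn dd ivs ans pos := by
  induction ivs generalizing ans pos with
  | nil => rfl
  | cons p t ih =>
    rw [List.foldl_cons]
    simp only [sweepRec]
    by_cases h1 : p.1 > pos
    · rw [if_pos (show p.1 > (ans, pos).2 from h1), if_pos h1]
      exact ih _ _
    · rw [if_neg (show ¬ p.1 > (ans, pos).2 from h1), if_neg h1]
      by_cases h2 : p.2 > pos
      · rw [if_pos (show p.2 > (ans, pos).2 from h2), if_pos h2]
        exact ih _ _
      · rw [if_neg (show ¬ p.2 > (ans, pos).2 from h2), if_neg h2]
        exact ih _ _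

theorem mapRange_split (f : Int → Bool) (a m b : Int) (h1 : a ≤ m) (h2 : m ≤ b) :
    (PySem.List.pyRange a b 1).map f
      = (PySem.List.pyRange a m 1).map f ++ (PySem.List.pyRange m b 1).map f := by
  rw [PySem.List.pyRange_one_append a m b h1 h2, List.map_append]

theorem mapRange_const (f : Int → Bool) (a b : Int) (v : Bool)
    (h : ∀ j, a ≤ j → j < b → f j = v) :
    (PySem.List.pyRange a b 1).map f = List.replicate (b - a).toNat v := by
  rw [List.map_congr_left (g := fun _ => v) (by
    intro x hx
    rw [PySem.List.mem_pyRange_one] at hx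
    exact h x hx.1 hx.2)]
  rw [List.map_const']
  rw [PySem.List.length_pyRange_one]

-- MAIN: the sorted-interval sweep computes the scan of the pointwise coverage predicate.
theorem sweep_eq_scan (n dd : Int) (ivs : List (Int × Int)) (ans pos : Int)
    (hpos : 0 ≤ pos) (hposn : pos ≤ n ∨ ivs = [])
    (hb : ∀ p ∈ ivs, 0 ≤ p.1 ∧ p.1 < p.2 ∧ p.2 ≤ n)
    (hsort : ivs.Pairwise (fun p q => p.1 ≤ q.1)) :
    sweepRec n dd ivs ans pos
      = scanRec dd ((PySem.List.pyRange pos n 1).map (covL ivs)) ans 0 := by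
  induction ivs generalizing ans pos with
  | nil =>
    rw [mapRange_const (covL []) pos n false (fun j _ _ => rfl)]
    rw [show List.replicate (n - pos).toNat false
        = List.replicate (n - pos).toNat false ++ ([] : List Bool) by simp,
      scanRec_false_prefix]
    simp only [sweepRec, scanRec]
    by_cases h : n > pos
    · rw [if_pos h, if_pos (show (0 : Int) + (((n - pos).toNat : Nat) : Int) > 0 by omega)]
      rw [show (0 : Int) + (((n - pos).toNat : Nat) : Int) = n - pos by omega]
      rw [show pyCeil (n - pos) dd = -(PySem.Int.floordiv (pos - n) dd) from by
        unfold pyCeil; rw [show -(n - pos) = pos - n by ring]]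
    · rw [if_neg h, if_neg (show ¬ ((0 : Int) + (((n - pos).toNat : Nat) : Int) > 0) by omega)]
  | cons p t ih =>
    have hp := hb p List.mem_cons_self
    have hbt : ∀ q ∈ t, 0 ≤ q.1 ∧ q.1 < q.2 ∧ q.2 ≤ n := fun q hq => hb q (List.mem_cons_of_mem _ hq)
    rw [List.pairwise_cons] at hsort
    obtain ⟨hhead, hsortt⟩ := hsort
    have hposn' : pos ≤ n := hposn.resolve_right (by simp)
    simp only [sweepRec]
    by_cases h1 : p.1 > pos
    · rw [if_pos h1]
      have e1 : (PySem.List.pyRange pos n 1).map (covL (p :: t))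
          = List.replicate (p.1 - pos).toNat false ++ (PySem.List.pyRange p.1 n 1).map (covL (p :: t)) := by
        rw [mapRange_split (covL (p :: t)) pos p.1 n (by omega) (by omega)]
        congr 1
        apply mapRange_const
        intro j hj1 hj2
        apply List.any_eq_false.mpr
        intro q hq
        rcases List.mem_cons.mp hq with rfl | hq
        · simp only [decide_eq_true_eq]; omega
        · have := hhead q hq
          simp only [decide_eq_true_eq]; omega
      rw [e1, scanRec_false_prefix]
      rw [PySem.List.pyRange_one_cons (show p.1 < n by omega), List.map_cons]
      rw [show covL (p :: t) p.1 = true from by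
        simp only [covL, List.any_cons, Bool.or_eq_true, decide_eq_true_eq]
        exact Or.inl ⟨le_refl _, hp.2.1⟩]
      simp only [scanRec]
      rw [show (0 : Int) + (((p.1 - pos).toNat : Nat) : Int) = p.1 - pos by omega]
      rw [show pyCeil (p.1 - pos) dd = -(PySem.Int.floordiv (pos - p.1) dd) from by
        unfold pyCeil; rw [show -(p.1 - pos) = pos - p.1 by ring]]
      have e2 : (PySem.List.pyRange (p.1 + 1) n 1).map (covL (p :: t))
          = List.replicate (p.2 - (p.1 + 1)).toNat true ++ (PySem.List.pyRange p.2 n 1).map (covL t) := by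
        rw [mapRange_split (covL (p :: t)) (p.1 + 1) p.2 n (by omega) (by omega)]
        congr 1
        · apply mapRange_const
          intro j hj1 hj2
          simp only [covL, List.any_cons, Bool.or_eq_true, decide_eq_true_eq]
          exact Or.inl ⟨by omega, hj2⟩
        · apply List.map_congr_left
          intro j hj
          rw [PySem.List.mem_pyRange_one] at hj
          simp only [covL, List.any_cons]
          rw [decide_eq_false (show ¬ (p.1 ≤ j ∧ j < p.2) by omega), Bool.false_or]
      rw [e2, scanRec_true_prefix]
      exact ih (ans + -(PySem.Int.floordiv (pos - p.1) dd)) p.2 (by omega)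
        (Or.inl (by omega)) hbt hsortt
    · rw [if_neg h1]
      by_cases h2 : p.2 > pos
      · rw [if_pos h2]
        have e : (PySem.List.pyRange pos n 1).map (covL (p :: t))
            = List.replicate (p.2 - pos).toNat true ++ (PySem.List.pyRange p.2 n 1).map (covL t) := by
          rw [mapRange_split (covL (p :: t)) pos p.2 n (by omega) (by omega)]
          congr 1
          · apply mapRange_const
            intro j hj1 hj2
            simp only [covL, List.any_cons, Bool.or_eq_true, decide_eq_true_eq]
            exact Or.inl ⟨by omega, hj2⟩
          · apply List.map_congr_left
            intro j hj
            rw [PySem.List.mem_pyRange_one] at hj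
            simp only [covL, List.any_cons]
            rw [decide_eq_false (show ¬ (p.1 ≤ j ∧ j < p.2) by omega), Bool.false_or]
        rw [e, scanRec_true_prefix]
        exact ih ans p.2 (by omega) (Or.inl (by omega)) hbt hsortt
      · rw [if_neg h2]
        have e : (PySem.List.pyRange pos n 1).map (covL (p :: t))
            = (PySem.List.pyRange pos n 1).map (covL t) := by
          apply List.map_congr_left
          intro j hj
          rw [PySem.List.mem_pyRange_one] at hj
          simp only [covL, List.any_cons]
          rw [decide_eq_false (show ¬ (p.1 ≤ j ∧ j < p.2) by omega), Bool.false_or]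
        rw [e]
        exact ih ans pos hpos (Or.inl hposn') hbt hsortt

-- ===== VERDICT (by name: the statement is the Claim_ definition above) =====
theorem covL_eq_cov (n w : Int) (stations : List Int) (j : Int) :
    covL (PySem.List.sorted2
        ((stations.map (fun i => (max 0 (i - w - 1), min n (i + w)))).filter
          (fun p => decide (p.1 < p.2)))
        (fun p => p.1) (fun p => p.2)) j
      = stations.any (fun i => decide (max 0 (i - w - 1) ≤ j ∧ j < min n (i + w))) := by
  unfold covL
  rw [(PySem.List.sorted2_perm _ _ _ _).any_eq]
  rw [List.any_filter, List.any_map]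
  apply PySem.List.any_congr_mem
  intro i _
  simp only [Function.comp_apply]
  by_cases hc : max 0 (i - w - 1) ≤ j ∧ j < min n (i + w)
  · rw [decide_eq_true hc, decide_eq_true (show max 0 (i - w - 1) < min n (i + w) by omega)]
    rfl
  · rw [decide_eq_false hc]
    simp

theorem solution_spec : Claim_equal_solution := by
  intro n stations w _
  unfold Spec_solution
  rw [solution_eq_scan]
  have hB : solution_alt n stations w
      = sweepRec n (2 * w + 1)
          (PySem.List.sorted2
            ((stations.map (fun i => (max 0 (i - w - 1), min n (i + w)))).filter
              (fun p => decide (p.1 < p.2)))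
            (fun p => p.1) (fun p => p.2)) 0 0 := by
    unfold solution_alt
    exact sweep_foldl_eq n (2 * w + 1) _ 0 0
  have hmem : ∀ p ∈ PySem.List.sorted2
        ((stations.map (fun i => (max 0 (i - w - 1), min n (i + w)))).filter
          (fun p => decide (p.1 < p.2)))
        (fun p => p.1) (fun p => p.2), 0 ≤ p.1 ∧ p.1 < p.2 ∧ p.2 ≤ n := by
    intro p hp
    rw [(PySem.List.sorted2_perm _ _ _ _).mem_iff, List.mem_filter] at hp
    obtain ⟨hpm, hplt⟩ := hp
    obtain ⟨i, _, rfl⟩ := List.mem_map.mp hpm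
    refine ⟨le_max_left _ _, by simpa using hplt, min_le_left _ _⟩
  have hposn : (0 : Int) ≤ n ∨ PySem.List.sorted2
        ((stations.map (fun i => (max 0 (i - w - 1), min n (i + w)))).filter
          (fun p => decide (p.1 < p.2)))
        (fun p => p.1) (fun p => p.2) = [] := by
    by_cases hivs : PySem.List.sorted2
        ((stations.map (fun i => (max 0 (i - w - 1), min n (i + w)))).filter
          (fun p => decide (p.1 < p.2)))
        (fun p => p.1) (fun p => p.2) = []
    · exact Or.inr hivs
    · left
      obtain ⟨p, hp⟩ := List.exists_mem_of_ne_nil _ hivs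
      have := hmem p hp
      omega
  rw [hB, sweep_eq_scan n (2 * w + 1) _ 0 0 le_rfl hposn hmem (sorted2_fst_pairwise _)]
  rw [show (2 : Int) * w + 1 = w * 2 + 1 by ring]
  congr 1
  apply List.map_congr_left
  intro j _
  exact (covL_eq_cov n w stations j).symm
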